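-- pv_equiv track=rewrite | github.com/recuraki/PythonJunkTest | atcoder/LeetCodeWeekly/307_a.py | minNumberOfHours
-- ===== SOURCE A (Python) =====
-- from typing import List, Tuple
--
-- def minNumberOfHours(initialEnergy: int, initialExperience: int, energy: List[int],
--                      experience: List[int]) -> int:
--     Ene = initialEnergy
--     Exp = initialExperience
--     needEne = 0
--     needExp = 0
--     n = len(energy)
--     for i in range(n):
--         tekiEne = energy[i]
--         tekiExp = experience[i]
--         needExp = max((tekiExp+1) - Exp, needExp)
--         needEne = max((tekiEne+1) - Ene, needEne)
--         Ene -= tekiEne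
--         Exp += tekiExp
--     return needEne+ needExp
-- ===== SOURCE B (Python) =====
-- def _omax(a, b):
--     if a is None:
--         return b
--     if b is None:
--         return a
--     return max(a, b)
--
-- def _comb(L, R):
--     # segment summaries: (sumE, maxE, sumX, maxX) where, within the segment,
--     # maxE = max_i (energy prefix through i + 1) and
--     # maxX = max_i (experience[i] + 1 - experience prefix before i); None if empty.
--     sE = L[0] + R[0]
--     sX = L[2] + R[2]
--     mE = _omax(L[1], None if R[1] is None else R[1] + L[0])
--     mX = _omax(L[3], None if R[3] is None else R[3] - L[2])
--     return (sE, mE, sX, mX)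
--
-- def _summ(ps):
--     # divide and conquer over pairs of fought enemies
--     if not ps:
--         return (0, None, 0, None)
--     if len(ps) == 1:
--         e, x = ps[0]
--         return (e, e + 1, x, x + 1)
--     k = len(ps) // 2
--     return _comb(_summ(ps[:k]), _summ(ps[k:]))
--
-- def minNumberOfHours(initialEnergy, initialExperience, energy, experience):
--     sE, mE, sX, mX = _summ(list(zip(energy, experience)))
--     needE = 0 if mE is None else max(0, mE - initialEnergy)
--     needX = 0 if mX is None else max(0, mX - initialExperience)
--     return needE + needX
-- ===== Notes on version B (the rewrite author's own statement) =====
-- stated objective: alternative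
-- what changed: A's single linear loop with mutable running counters is replaced by a divide-and-conquer: the fought (energy,experience) pairs are split at the midpoint, each half is reduced to a composable segment summary (sum, max prefix-energy demand, sum, max experience deficit), summaries are merged, and the two needs are read off the root summary in closed form.
import Mathlib
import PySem

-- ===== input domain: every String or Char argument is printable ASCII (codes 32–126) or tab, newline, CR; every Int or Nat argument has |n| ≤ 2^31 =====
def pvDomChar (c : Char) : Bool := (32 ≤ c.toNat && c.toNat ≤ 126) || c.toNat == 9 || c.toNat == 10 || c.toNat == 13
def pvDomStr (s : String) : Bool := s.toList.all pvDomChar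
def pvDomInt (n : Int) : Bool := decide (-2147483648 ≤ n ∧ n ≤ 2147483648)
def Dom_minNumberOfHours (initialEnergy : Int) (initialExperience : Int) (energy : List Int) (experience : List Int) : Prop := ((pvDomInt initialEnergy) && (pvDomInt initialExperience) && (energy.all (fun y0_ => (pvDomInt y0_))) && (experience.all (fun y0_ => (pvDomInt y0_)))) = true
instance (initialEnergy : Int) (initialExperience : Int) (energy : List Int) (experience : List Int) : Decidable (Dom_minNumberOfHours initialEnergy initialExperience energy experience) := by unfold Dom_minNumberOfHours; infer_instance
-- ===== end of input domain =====

-- B replaces A's single linear loop by divide-and-conquer over the zipped pairs with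
-- composable segment summaries; same O(n) cost, different algorithm (objective: alternative).

-- ===== PORT A =====
-- A's loop body over `for i in range(n)`; state = (Ene, Exp, needEne, needExp).
-- energy[i] / experience[i] via pyGetD: A raises IndexError when i ≥ len(experience); excluded by Pre_.
def pvStepA (energy experience : List Int) (st : Int × Int × Int × Int) (i : Int) : Int × Int × Int × Int :=
  let tekiEne := PySem.List.pyGetD energy i 0
  let tekiExp := PySem.List.pyGetD experience i 0
  (st.1 - tekiEne, st.2.1 + tekiExp,
   max ((tekiEne + 1) - st.1) st.2.2.1,
   max ((tekiExp + 1) - st.2.1) st.2.2.2)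

def minNumberOfHours (initialEnergy : Int) (initialExperience : Int) (energy : List Int) (experience : List Int) : Int :=
  let st := (PySem.List.pyRange 0 (PySem.List.len energy) 1).foldl
      (pvStepA energy experience) (initialEnergy, initialExperience, 0, 0)
  st.2.2.1 + st.2.2.2

-- ===== PORT B =====
-- _omax of Source B
def pvOmax (a b : Option Int) : Option Int :=
  match a with
  | none => b
  | some x => match b with
    | none => some x
    | some y => some (max x y)

-- _comb of Source B: merge two segment summaries (sumE, maxE, sumX, maxX)
def pvComb (L R : Int × Option Int × Int × Option Int) : Int × Option Int × Int × Option Int :=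
  (L.1 + R.1,
   pvOmax L.2.1 (match R.2.1 with | none => none | some m => some (m + L.1)),
   L.2.2.1 + R.2.2.1,
   pvOmax L.2.2.2 (match R.2.2.2 with | none => none | some m => some (m - L.2.2.1)))

-- _summ of Source B: divide-and-conquer summary of a pair list
def pvSumm (ps : List (Int × Int)) : Int × Option Int × Int × Option Int :=
  match ps with
  | [] => (0, none, 0, none)
  | [p] => (p.1, some (p.1 + 1), p.2, some (p.2 + 1))
  | p :: q :: rest =>
      pvComb (pvSumm ((p :: q :: rest).take ((p :: q :: rest).length / 2)))
             (pvSumm ((p :: q :: rest).drop ((p :: q :: rest).length / 2)))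
termination_by ps.length
decreasing_by
  all_goals simp [List.length_take, List.length_drop]; omega

def minNumberOfHours_alt (initialEnergy : Int) (initialExperience : Int) (energy : List Int) (experience : List Int) : Int :=
  let s := pvSumm (energy.zip experience)
  (match s.2.1 with | none => 0 | some m => max 0 (m - initialEnergy)) +
  (match s.2.2.2 with | none => 0 | some m => max 0 (m - initialExperience))

-- ===== PRECONDITION & SPEC =====
-- A indexes experience[i] for every i < len(energy): it raises IndexError when experience is shorter.
def Pre_minNumberOfHours (initialEnergy : Int) (initialExperience : Int) (energy : List Int) (experience : List Int) : Prop :=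
  energy.length ≤ experience.length
instance (initialEnergy : Int) (initialExperience : Int) (energy : List Int) (experience : List Int) : Decidable (Pre_minNumberOfHours initialEnergy initialExperience energy experience) := by unfold Pre_minNumberOfHours; infer_instance

def pvWitness_minNumberOfHours : Int × Int × List Int × List Int := (5, 3, [1, 4], [2, 6, 1])

def Spec_minNumberOfHours (initialEnergy : Int) (initialExperience : Int) (energy : List Int) (experience : List Int) (out : Int) : Prop := out = minNumberOfHours_alt initialEnergy initialExperience energy experience
instance (initialEnergy : Int) (initialExperience : Int) (energy : List Int) (experience : List Int) (out : Int) : Decidable (Spec_minNumberOfHours initialEnergy initialExperience energy experience out) := by unfold Spec_minNumberOfHours; infer_instance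

-- ===== CLAIM (what is proved, stated in full; the proofs are below) =====
def Claim_equal_minNumberOfHours : Prop := ∀ (initialEnergy : Int) (initialExperience : Int) (energy : List Int) (experience : List Int), Dom_minNumberOfHours initialEnergy initialExperience energy experience → Pre_minNumberOfHours initialEnergy initialExperience energy experience → Spec_minNumberOfHours initialEnergy initialExperience energy experience (minNumberOfHours initialEnergy initialExperience energy experience)

-- ===== LEMMAS AND PROOFS =====

-- singleton summary
def pvSingle (p : Int × Int) : Int × Option Int × Int × Option Int :=
  (p.1, some (p.1 + 1), p.2, some (p.2 + 1))

-- linear reference summary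
def pvLin (ps : List (Int × Int)) : Int × Option Int × Int × Option Int :=
  ps.foldl (fun acc p => pvComb acc (pvSingle p)) (0, none, 0, none)

lemma pvComb_id_left (R : Int × Option Int × Int × Option Int) : pvComb (0, none, 0, none) R = R := by
  obtain ⟨sE, mE, sX, mX⟩ := R
  cases mE <;> cases mX <;> simp [pvComb, pvOmax]

lemma pvMaxAdd (a b c : Int) : max a b + c = max (a + c) (b + c) := by
  rcases le_total a b with h | h
  · rw [max_eq_right h, max_eq_right (by omega)]
  · rw [max_eq_left h, max_eq_left (by omega)]

lemma pvMaxSub (a b c : Int) : max a b - c = max (a - c) (b - c) := by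
  rcases le_total a b with h | h
  · rw [max_eq_right h, max_eq_right (by omega)]
  · rw [max_eq_left h, max_eq_left (by omega)]

def pvShift (o : Option Int) (s : Int) : Option Int := match o with | none => none | some m => some (m + s)

lemma pvMatchAdd (o : Option Int) (s : Int) :
    (match o with | none => none | some m => some (m + s) : Option Int) = pvShift o s := by
  cases o <;> rfl

lemma pvMatchSub (o : Option Int) (s : Int) :
    (match o with | none => none | some m => some (m - s) : Option Int) = pvShift o (-s) := by
  cases o <;> simp only [pvShift, sub_eq_add_neg]

lemma pvOmax_assoc (a b c : Option Int) : pvOmax (pvOmax a b) c = pvOmax a (pvOmax b c) := by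
  cases a <;> cases b <;> cases c <;> simp [pvOmax, max_assoc]

lemma pvShift_omax (a b : Option Int) (s : Int) :
    pvShift (pvOmax a b) s = pvOmax (pvShift a s) (pvShift b s) := by
  cases a <;> cases b <;> simp only [pvOmax, pvShift, pvMaxAdd]

lemma pvShift_shift (o : Option Int) (s t : Int) :
    pvShift (pvShift o s) t = pvShift o (s + t) := by
  cases o <;> simp only [pvShift, add_assoc]

lemma pvComb_assoc (A B C : Int × Option Int × Int × Option Int) :
    pvComb (pvComb A B) C = pvComb A (pvComb B C) := by
  simp only [pvComb, pvMatchAdd, pvMatchSub, pvShift_omax, pvShift_shift, pvOmax_assoc]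
  refine Prod.ext (by ring) (Prod.ext ?_ (Prod.ext (by ring) ?_)) <;> ring_nf

lemma pvLin_foldl (ps : List (Int × Int)) :
    ∀ acc, ps.foldl (fun a p => pvComb a (pvSingle p)) acc = pvComb acc (pvLin ps) := by
  induction ps with
  | nil =>
      intro acc
      obtain ⟨a1, a2, a3, a4⟩ := acc
      cases a2 <;> cases a4 <;> (try simp [pvLin, pvComb, pvOmax])
  | cons p ps ih =>
      intro acc
      have h : pvLin (p :: ps) = pvComb (pvSingle p) (pvLin ps) := by
        unfold pvLin
        rw [List.foldl_cons, pvComb_id_left]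
        exact ih (pvSingle p)
      rw [List.foldl_cons, ih, h, pvComb_assoc]

lemma pvLin_append (l r : List (Int × Int)) : pvLin (l ++ r) = pvComb (pvLin l) (pvLin r) := by
  simp only [pvLin, List.foldl_append]
  exact pvLin_foldl r _

-- divide-and-conquer computes the linear summary
lemma pvSumm_eq_lin (ps : List (Int × Int)) : pvSumm ps = pvLin ps := by
  induction ps using pvSumm.induct with
  | case1 => simp [pvSumm, pvLin]
  | case2 p =>
      simp [pvSumm, pvLin, pvSingle, pvComb_id_left]
  | case3 p q rest ih1 ih2 =>
      rw [pvSumm, ih1, ih2, ← pvLin_append, List.take_append_drop]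

lemma pvLin_cons (p : Int × Int) (ps : List (Int × Int)) :
    pvLin (p :: ps) = pvComb (pvSingle p) (pvLin ps) := by
  have : p :: ps = [p] ++ ps := rfl
  rw [this, pvLin_append]
  congr 1
  simp [pvLin, pvComb_id_left]

-- A's step expressed on a materialised (energy, experience) pair.
def pvStepZ (st : Int × Int × Int × Int) (p : Int × Int) : Int × Int × Int × Int :=
  (st.1 - p.1, st.2.1 + p.2,
   max ((p.1 + 1) - st.1) st.2.2.1,
   max ((p.2 + 1) - st.2.1) st.2.2.2)

-- A's indexed fold over range(len(energy)) is the fold over the zipped lists.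
lemma pvFoldA_eq_zip : ∀ (es xs : List Int), es.length ≤ xs.length →
    ∀ (st : Int × Int × Int × Int),
    (PySem.List.pyRange 0 (PySem.List.len es) 1).foldl (pvStepA es xs) st
      = (es.zip xs).foldl pvStepZ st := by
  intro es
  induction es with
  | nil =>
      intro xs _ st
      simp [PySem.List.pyRange_one_eq_nil, PySem.List.len]
  | cons e es ih =>
      intro xs hlen st
      cases xs with
      | nil => simp at hlen
      | cons x xs =>
        have h0 : (0 : Int) < PySem.List.len (e :: es) := by
          simp only [PySem.List.len_eq, List.length_cons]; omega
        rw [PySem.List.pyRange_one_cons h0]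
        simp only [List.foldl_cons, List.zip_cons_cons]
        have hstep : pvStepA (e :: es) (x :: xs) st 0 = pvStepZ st (e, x) := by
          simp [pvStepA, pvStepZ, PySem.List.pyGetD_zero_cons]
        rw [hstep]
        have hlen1 : PySem.List.len (e :: es) = (es.length : Int) + 1 := by
          simp only [PySem.List.len_eq, List.length_cons]; push_cast; ring
        have hr : PySem.List.pyRange (0 + 1) ((es.length : Int) + 1) 1
            = (PySem.List.pyRange 0 (PySem.List.len es) 1).map (fun j => j + 1) := by
          simp only [PySem.List.pyRange_one, PySem.List.len_eq, List.map_map]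
          have h1 : ((es.length : Int) + 1 - (0 + 1)).toNat = es.length := by omega
          have h2 : ((es.length : Int) - 0).toNat = es.length := by omega
          rw [h1, h2]
          apply List.map_congr_left
          intro k _
          simp
          ring
        rw [hlen1, hr, List.foldl_map]
        have hfun : ∀ (acc : Int × Int × Int × Int), ∀ j ∈ PySem.List.pyRange 0 (PySem.List.len es) 1,
            pvStepA (e :: es) (x :: xs) acc (j + 1) = pvStepA es xs acc j := by
          intro acc j hj
          rw [PySem.List.mem_pyRange_one] at hj
          obtain ⟨k, rfl⟩ : ∃ k : Nat, j = (k : Int) := ⟨j.toNat, by omega⟩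
          have hk : (k : Int) + 1 = ((k + 1 : Nat) : Int) := by push_cast; ring
          have e1 : PySem.List.pyGetD (e :: es) ((k : Int) + 1) 0 = PySem.List.pyGetD es (k : Int) 0 := by
            rw [hk, PySem.List.pyGetD_natCast, PySem.List.pyGetD_natCast]
            simp
          have e2 : PySem.List.pyGetD (x :: xs) ((k : Int) + 1) 0 = PySem.List.pyGetD xs (k : Int) 0 := by
            rw [hk, PySem.List.pyGetD_natCast, PySem.List.pyGetD_natCast]
            simp
          simp only [pvStepA, e1, e2]
        rw [PySem.List.foldl_congr_mem _ _ _ _ hfun]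
        exact ih xs (by simp at hlen; omega) _

-- the zip fold of A, read off the linear summary
lemma pvFoldZ_lin : ∀ (ps : List (Int × Int)) (iE t exp nE nX : Int),
    ps.foldl pvStepZ (iE - t, exp, nE, nX)
      = (iE - (t + (pvLin ps).1), exp + (pvLin ps).2.2.1,
         (match (pvLin ps).2.1 with | none => nE | some m => max nE (m + t - iE)),
         (match (pvLin ps).2.2.2 with | none => nX | some m => max nX (m - exp))) := by
  intro ps
  induction ps with
  | nil => intro iE t exp nE nX; simp [pvLin]
  | cons p ps ih =>
      intro iE t exp nE nX
      rw [pvLin_cons]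
      simp only [List.foldl_cons, pvStepZ]
      have h1 : iE - t - p.1 = iE - (t + p.1) := by ring
      have h2 : max ((p.1 + 1) - (iE - t)) nE = max nE ((p.1 + 1) + t - iE) := by
        rw [max_comm]; congr 1; ring
      have h3 : max ((p.2 + 1) - exp) nX = max nX (p.2 + 1 - exp) := max_comm _ _
      rw [h1, h2, h3, ih]
      obtain ⟨s1, m1, s2, m2⟩ := pvLin ps
      cases m1 <;> cases m2 <;>
        (try simp only [pvComb, pvSingle, pvOmax, Prod.mk.injEq])
      all_goals ((try simp only [pvMaxAdd, pvMaxSub, max_assoc]); (try ring_nf))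
      all_goals simp

-- ===== VERDICT (by name: the statement is the Claim_ definition above) =====
theorem minNumberOfHours_spec : Claim_equal_minNumberOfHours := by
  intro iE iX energy experience _ hpre
  unfold Spec_minNumberOfHours minNumberOfHours minNumberOfHours_alt
  rw [pvFoldA_eq_zip energy experience hpre]
  have h := pvFoldZ_lin (energy.zip experience) iE 0 iX 0 0
  rw [sub_zero] at h
  rw [h, pvSumm_eq_lin]
  obtain ⟨s1, m1, s2, m2⟩ := pvLin (energy.zip experience)
  cases m1 <;> cases m2 <;> simp
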